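/-
  THE CONTRACTS OF THE HEAP (c/heap/heap.c): `Spec`s (UserX/Contract.lean) over the heap's invariant (Asan/Heap.lean).
  Program-independent: the one thing of a program that occurs is its text record `T : ProgX.Text` (through `ShadowPre T`), as in
  ProgX/Spec/Libc.lean. (Written by agent GA as Asan/HeapSpec.lean over a copy of the vocabulary, Asan/Live.lean, with a parameter
  `T : Nat`; here over THE vocabulary, ProgX/Spec/Basic.lean. `LiveIn` through `malloc` / `free` / in-place `realloc`: §0.)

  GHOST PARAMETERS of every Spec: `T`, the heap `H`, the other live objects `rest` (globals, input, output: everything live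
  that is neither a stack object nor a heap object), the active protected frames `frames`. `free`, `realloc`, `reallocarray` add the
  size `n` of the object they are called for.

      HeapPre T H rest frames u     the common precondition: `HeapInv H rest frames (rsp + 8) u.mem`; the heap is where heap.c puts it
                                         (`[800000H, C00000H)`); no object of `rest`, and no heap object, lies in the text
      HeapPre.shadowPre                  … which gives the shadow clause `ShadowPre T (H.liveObjs ++ rest) frames u` every other
                                         contract asks for: a client passes ONE fact through all its calls

      heap_alloc.spec      rdi = n, rsi = c         (static `heap_alloc`) `H.Fits c`: rax = H.next, the heap is `H.push n c` (one more LIVE object of exactly n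
                                                  bytes, capacity c, contents arbitrary); otherwise `FailPost`: rax = 0, NOTHING but stack written
      malloc.spec         rdi = n                  the same with c = r16 n
      calloc.spec         rdi = k, rsi = s         the same for n = k · s (the product of the NUMBERS: a product that does not fit 64 bits does
                                                  not fit the heap either), and the n bytes are 0
      free.spec n         rdi = p                  p = 0: nothing. `H.Live p n`: the heap is `H.release p` (that object FREED, every other as it was:
                                                  `Heap.Live.release_ne`, `free_keeps`)
      realloc.spec n c    rdi = p, rsi = m         p = 0: as malloc(m). `H.LiveCap p n c`: THREE outcomes (`ReallocPost`, `ReallocPost.cases`):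
                                                  in place (r16 m ≤ c: same address, the heap is `H.resize p m`), moved (rax = H.next, the heap is
                                                  `(H.push m c').release p`, the n bytes copied), failed (`FailPost`: the old object live, untouched).
                                                  EVERY outcome says WHAT WAS WRITTEN (`Mem.SameExcept` with the windows of that outcome, all inside the
                                                  stack frame, the heap's region and its shadow); the static `writes` are CLIPPED to the heap's region
                                                  (`realloc.spec_writes_inside`): see "THE FOOTPRINT OF `realloc`" before `realloc.spec`
      reallocarray.spec n c      rdi = p, rsi = k, rdx = s      the same for m = k · s
      heap_live_size.spec n     rdi = p                  (static helper `heap_live_size`) `H.Live p n`: rax = n, memory unchanged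
      heap_product_ok.spec      rdi = k, rsi = s         (static helper `heap_product_ok`) 1 if a factor is 0 or both are ≤ ROOM, else 0

  THE REPORT ROUTINE. `free` / `realloc` of a pointer that is neither NULL nor the start of a LIVE object call `__asan_report`. The
  contracts exclude that by their precondition (`p = 0 ∨ H.Live p n`), exactly as a check's contract excludes a bad address; the
  invariant of the way of every `Calls` says RIP is never at the report routine.

  SIZE 0. `malloc(0)`, `calloc` with a zero product: a live object of size 0 in a chunk of 64 bytes (nothing accessible), or NULL.
  `realloc(p, 0)`: `r16 0 = 0 ≤ c`: p itself, shrunk to size 0 in place (never NULL, p stays live). So for `realloc`: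
  rax = 0 ⇔ failure ⇔ the old object is still live and untouched, without exception.

  STACK (by hand against c/heap/heaptest.dis; `frame` = the bytes below the return address, with everything called):
      function           own                       callees (frame)                                          frame
      heap_live_size     sub 8                     — (the four calls of the report routine are never taken)      8
      heap_product_ok    —                         —                                                             0
      heap_alloc         push rbx = 8              arena_unpoison (0)                                  8 + 8 + 0 = 16
      malloc             sub 8                     heap_alloc (16)                                    8 + 8 + 16 = 32
      free               push rbx = 8              heap_live_size (8), arena_poison (0)                8 + 8 + 8 = 24
      calloc             2 pushes + sub 8 = 24     heap_product_ok (0), malloc (32), memset (64)      24 + 8 + 64 = 96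
      realloc            4 pushes + sub 8 = 40     heap_live_size (8), heap_alloc (16), malloc (32), memcpy (80), free (24),
                                                   arena_poison / arena_unpoison (0)                  40 + 8 + 80 = 128
      reallocarray       3 pushes = 24             heap_product_ok (0), realloc (128)                 24 + 8 + 128 = 160
-/
import Asan.Heap
import ProgX.Spec.Runtime
import ProgX.Spec.Libc
namespace ProgX.Spec
open X86 X86.User Asan

/-! ### 0. Live ranges of a client, through `malloc`, `free` and an in-place `realloc` (from Asan/Heap.lean §7 of agent GA) -/

/-- **A range inside a live heap object is live** (the `LiveIn` a callee's contract asks for). -/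
theorem _root_.Asan.Heap.Live.liveIn {H : Heap} {p n : Nat} (h : H.Live p n) (rest : List Obj) (frames : List (Nat × FrameLayout))
    {a k : Nat} (h1 : p ≤ a) (h2 : a + k ≤ p + n) : LiveIn (H.liveObjs ++ rest) frames a k :=
  LiveIn.of_other (o := ⟨p, n, .heap⟩) (List.mem_append_left _ h.mem_liveObjs) h1 h2

/-- **An allocation keeps every live range live.** -/
theorem _root_.ProgX.LiveIn.heap_push {H : Heap} {rest : List Obj} {frames : List (Nat × FrameLayout)} {a k : Nat}
    (h : LiveIn (H.liveObjs ++ rest) frames a k) (n c : Nat) : LiveIn ((H.push n c).liveObjs ++ rest) frames a k := by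
  apply h.mono_others
  intro o ho
  rw [Heap.liveObjs_push]
  exact List.mem_cons_of_mem _ ho

/-- **`free(p)` keeps every live range that does not lie in the freed object** (`k ≥ 1`: an empty range lies in everything). The
range is given off the freed object's bytes; that it cannot lie in ANOTHER object with the same base is `HeapOK.base_inj`. -/
theorem _root_.ProgX.LiveIn.heap_release {H : Heap} {mem : Mem} {rest : List Obj} {frames : List (Nat × FrameLayout)} {a k p n : Nat}
    (h : LiveIn (H.liveObjs ++ rest) frames a k) (hok : HeapOK H mem) (hl : H.Live p n) (hk : 0 < k)
    (hout : a + k ≤ p ∨ p + n ≤ a) :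
    LiveIn ((H.release p).liveObjs ++ rest) frames a k := by
  obtain ⟨o, ho, k1, k2⟩ := h
  refine ⟨o, ?_, k1, k2⟩
  rcases List.mem_append.mp ho with hs | hoth
  · exact List.mem_append_left _ hs
  · apply List.mem_append_right
    rcases List.mem_append.mp hoth with hheap | hr
    · apply List.mem_append_left
      apply Heap.mem_liveObjs_release.mpr
      refine ⟨hheap, ?_⟩
      intro hb
      obtain ⟨hlo, _⟩ := Heap.live_of_mem_liveObjs hheap
      have hsz := hok.live_size hl (hb ▸ hlo)
      omega
    · exact List.mem_append_right _ hr

/-- **An in-place `realloc(p, m)` keeps every live range that does not lie in the resized object, and every range inside its new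
size.** -/
theorem _root_.ProgX.LiveIn.heap_resize {H : Heap} {mem : Mem} {rest : List Obj} {frames : List (Nat × FrameLayout)} {a k p n m : Nat}
    (h : LiveIn (H.liveObjs ++ rest) frames a k) (hok : HeapOK H mem) (hl : H.Live p n) (hk : 0 < k)
    (hout : a + k ≤ p ∨ p + n ≤ a ∨ (p ≤ a ∧ a + k ≤ p + m)) :
    LiveIn ((H.resize p m).liveObjs ++ rest) frames a k := by
  obtain ⟨o, ho, k1, k2⟩ := h
  rcases List.mem_append.mp ho with hs | hoth
  · exact ⟨o, List.mem_append_left _ hs, k1, k2⟩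
  · rcases List.mem_append.mp hoth with hheap | hr
    · obtain ⟨hlo, hko⟩ := Heap.live_of_mem_liveObjs hheap
      by_cases hb : o.base = p
      · have hsz := hok.live_size hl (hb ▸ hlo)
        have hin : p ≤ a ∧ a + k ≤ p + m := by omega
        exact (Heap.live_resize hl m).liveIn rest frames hin.1 hin.2
      · refine ⟨o, ?_, k1, k2⟩
        apply List.mem_append_right
        apply List.mem_append_left
        exact Heap.mem_liveObjs_of_live (hlo.resize_ne hb m) hko
    · exact ⟨o, List.mem_append_right _ (List.mem_append_right _ hr), k1, k2⟩


/-- **The common precondition of the heap's functions**: the heap's invariant with the clean stack ending at the caller's stack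
pointer; the heap is the region heap.c is compiled for; the text ends below it and below every other live object. -/
structure HeapPre (T : Text) (H : Heap) (rest : List Obj) (frames : List (Nat × FrameLayout)) (u : State) : Prop where
  inv : HeapInv H rest frames ((u.reg .rsp).toNat + 8) u.mem
  /-- HEAP_BASE of heap.c -/
  base : H.base = 0x800000
  /-- HEAP_LIMIT of heap.c -/
  limit : H.limit = 0xC00000
  /-- the image's text lies below every heap (link scripts end the image below 1F0000H) -/
  text : T.hi ≤ 0x200000
  offText : ∀ o, o ∈ rest → T.hi ≤ o.base

namespace HeapPre
variable {T : Text} {H : Heap} {rest : List Obj} {frames : List (Nat × FrameLayout)} {u : State}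

/-- No live object — heap object or other — lies in the text. -/
theorem offText_all (h : HeapPre T H rest frames u) : ∀ o, o ∈ H.liveObjs ++ rest → T.hi ≤ o.base := by
  intro o ho
  rcases List.mem_append.mp ho with hheap | hr
  · obtain ⟨⟨c, hl⟩, _⟩ := Heap.live_of_mem_liveObjs hheap
    have := h.inv.heap.obj_inside hl
    have ht := h.text
    simp only at this
    omega
  · exact h.offText o hr

/-- **The shadow clause every other contract asks for**, over the live list `H.liveObjs ++ rest`. -/
theorem shadowPre (h : HeapPre T H rest frames u) : ShadowPre T (H.liveObjs ++ rest) frames u :=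
  ⟨h.inv.shadow, h.offText_all⟩

/-- The precondition for another heap at the same place (after a transition), from the invariant at the same stack pointer. -/
theorem of_inv {H' : Heap} {v : State} (h : HeapPre T H rest frames u)
    (hinv : HeapInv H' rest frames ((v.reg .rsp).toNat + 8) v.mem) (hb : H'.base = H.base) (hl : H'.limit = H.limit) :
    HeapPre T H' rest frames v :=
  ⟨hinv, by rw [hb]; exact h.base, by rw [hl]; exact h.limit, h.text, h.offText⟩

/-- **The precondition at a callee's entry, from the caller's own** (the `pre_<addr>` goal of a call of a heap function, or of any
function that takes `HeapPre`): no store of the caller so far went to the shadow or into the heap's region, the callee is entered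
with a lower stack pointer, still 8-aligned and inside the stack region. -/
theorem callee {v : State} (h : HeapPre T H rest frames u) (hun : ShadowUntouched u.mem v.mem)
    (hsame : Mem.EqOn H.base H.limit u.mem v.mem) (hle : (v.reg .rsp).toNat ≤ (u.reg .rsp).toNat)
    (h8 : (v.reg .rsp).toNat % 8 = 0) (hlo : 0x700000 ≤ (v.reg .rsp).toNat + 8) : HeapPre T H rest frames v :=
  ⟨(h.inv.eqOn hun hsame).lower (by omega) (by omega) hlo, h.base, h.limit, h.text, h.offText⟩

/-- **Back at the caller's stack pointer**: the invariant a callee's post states at ITS `rsp + 8` (below the caller's), restated at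
the caller's `rsp + 8` (every active protected frame lies at or above it: the pre says so). -/
theorem raise_back {H' : Heap} {t : Nat} {mem : Mem} (h : HeapPre T H rest frames u) (k : HeapInv H' rest frames t mem)
    (ht : t ≤ (u.reg .rsp).toNat + 8) : HeapInv H' rest frames ((u.reg .rsp).toNat + 8) mem := by
  have hst := h.inv.shadow.stack
  refine k.raise ht hst.aligned hst.hi ?_
  intro bF hbF
  exact (hst.active bF hbF).2.2.1

end HeapPre

/-! ### The contracts -/

/-- **`heap_live_size(rdi = p)`** (static): `p` is the start of the live object `(p, n)`. Returns `n`; writes nothing (its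
`sub rsp, 8` reserves the slot a call of the report routine would push into: never used). -/
def heap_live_size.spec (H : Heap) (n : Nat) : Spec where
  pre u := HeapOK H u.mem ∧ H.base = 0x800000 ∧ H.Live (u.reg .rdi).toNat n
  post u v := (v.reg .rax).toNat = n ∧ v.mem = u.mem
  frame := 8
  writes _ := []

@[vspec] theorem heap_live_size.spec_frame (H : Heap) (n : Nat) : (heap_live_size.spec H n).frame = 8 := id rfl
@[vspec] theorem heap_live_size.spec_writes (H : Heap) (n : Nat) (u : State) : (heap_live_size.spec H n).writes u = [] := id rfl

/-- **`heap_product_ok(rdi = k, rsi = s)`** (static): answers 1 if a factor is 0 or both are at most `ROOM = 3FFFE0H`, else 0. A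
leaf without a frame; nothing is written. -/
def heap_product_ok.spec : Spec where
  pre _ := True
  post u v :=
    v.mem = u.mem ∧
    (((u.reg .rdi).toNat = 0 ∨ (u.reg .rsi).toNat = 0 ∨ ((u.reg .rdi).toNat ≤ 0x3FFFE0 ∧ (u.reg .rsi).toNat ≤ 0x3FFFE0)) →
      (v.reg .rax).toNat % 2 ^ 32 = 1) ∧
    (¬ ((u.reg .rdi).toNat = 0 ∨ (u.reg .rsi).toNat = 0 ∨ ((u.reg .rdi).toNat ≤ 0x3FFFE0 ∧ (u.reg .rsi).toNat ≤ 0x3FFFE0)) →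
      (v.reg .rax).toNat % 2 ^ 32 = 0)
  frame := 0
  writes _ := []

@[vspec] theorem heap_product_ok.spec_frame : heap_product_ok.spec.frame = 0 := id rfl
@[vspec] theorem heap_product_ok.spec_writes (u : State) : heap_product_ok.spec.writes u = [] := id rfl

/-- **The postcondition of a FAILED allocation** (every NULL arm of a client is reachable: this must be as usable as success):
rax = 0; the heap's invariant for the SAME heap; no shadow byte written; and NOTHING was written but the `F` bytes of stack below
the return address (`F` the contract's frame): not the control cell, not a header, not an object. -/
def FailPost (H : Heap) (rest : List Obj) (frames : List (Nat × FrameLayout)) (F : Nat) (u v : State) : Prop :=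
  v.reg .rax = 0 ∧
  HeapInv H rest frames ((u.reg .rsp).toNat + 8) v.mem ∧
  ShadowUntouched u.mem v.mem ∧
  Mem.SameExcept [⟨(u.reg .rsp).toNat - F, (u.reg .rsp).toNat⟩] u.mem v.mem

/-- The postcondition of an allocation of `n` bytes with capacity `c` that frees nothing: success is decided by `H.Fits c`. Success:
rax is the new object `H.next` (16-aligned, `≠ 0`), the heap is `H.push n c`: one more live object of EXACTLY `n` bytes, its contents
arbitrary, above everything that was ever allocated (`HeapOK.next_above`). -/
def AllocPost (H : Heap) (rest : List Obj) (frames : List (Nat × FrameLayout)) (F n c : Nat) (u v : State) : Prop :=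
  (H.Fits c →
    (v.reg .rax).toNat = H.next ∧
    HeapInv (H.push n c) rest frames ((u.reg .rsp).toNat + 8) v.mem) ∧
  (¬ H.Fits c → FailPost H rest frames F u v)

/-- **`heap_alloc(rdi = n, rsi = c)`** (static): a new chunk of capacity `c` (a multiple of 16, at least `r16 n`, small enough not to
wrap) for an object of `n` bytes. Footprint: the control cell, the new header, the shadow of the new object, 16 bytes of stack. -/
def heap_alloc.spec (T : Text) (H : Heap) (rest : List Obj) (frames : List (Nat × FrameLayout)) : Spec where
  pre u :=
    HeapPre T H rest frames u ∧ r16 (u.reg .rdi).toNat ≤ (u.reg .rsi).toNat ∧ (u.reg .rsi).toNat % 16 = 0 ∧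
    (u.reg .rsi).toNat ≤ 0x1000000
  post u v := AllocPost H rest frames 16 (u.reg .rdi).toNat (u.reg .rsi).toNat u v
  frame := 16
  writes u :=
    [⟨0x800000, 0x800008⟩,
     ⟨H.next - 32, H.next - 8⟩,
     shadowSpan H.next (H.next + (u.reg .rdi).toNat)]

@[vspec] theorem heap_alloc.spec_frame (T : Text) (H : Heap) (rest : List Obj) (frames : List (Nat × FrameLayout)) :
    (heap_alloc.spec T H rest frames).frame = 16 := id rfl

@[vspec] theorem heap_alloc.spec_writes (T : Text) (H : Heap) (rest : List Obj) (frames : List (Nat × FrameLayout)) (u : State) :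
    (heap_alloc.spec T H rest frames).writes u =
      [⟨0x800000, 0x800008⟩,
       ⟨H.next - 32, H.next - 8⟩,
       shadowSpan H.next (H.next + (u.reg .rdi).toNat)] := id rfl

/-- **`malloc(rdi = n)`**: TOTAL. `H.Fits (r16 n)`: returns the new object `H.next`, the heap is `H.push n (r16 n)`. Otherwise
returns 0 and nothing but stack was written (`FailPost`). Footprint: the control cell, the new header, the shadow of the new
object, 32 bytes of stack. -/
def malloc.spec (T : Text) (H : Heap) (rest : List Obj) (frames : List (Nat × FrameLayout)) : Spec where
  pre u := HeapPre T H rest frames u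
  post u v := AllocPost H rest frames 32 (u.reg .rdi).toNat (r16 (u.reg .rdi).toNat) u v
  frame := 32
  writes u :=
    [⟨0x800000, 0x800008⟩,
     ⟨H.next - 32, H.next - 8⟩,
     shadowSpan H.next (H.next + (u.reg .rdi).toNat)]

@[vspec] theorem malloc.spec_frame (T : Text) (H : Heap) (rest : List Obj) (frames : List (Nat × FrameLayout)) :
    (malloc.spec T H rest frames).frame = 32 := id rfl

@[vspec] theorem malloc.spec_writes (T : Text) (H : Heap) (rest : List Obj) (frames : List (Nat × FrameLayout)) (u : State) :
    (malloc.spec T H rest frames).writes u =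
      [⟨0x800000, 0x800008⟩,
       ⟨H.next - 32, H.next - 8⟩,
       shadowSpan H.next (H.next + (u.reg .rdi).toNat)] := id rfl

/-- **`calloc(rdi = k, rsi = s)`**: as `malloc(k · s)` — the product of the NUMBERS; `heap_product_ok` refuses a pair whose product
may not fit 64 bits, and such a product does not fit the heap — and the `k · s` bytes of the new object are 0. -/
def calloc.spec (T : Text) (H : Heap) (rest : List Obj) (frames : List (Nat × FrameLayout)) : Spec where
  pre u := HeapPre T H rest frames u
  post u v :=
    AllocPost H rest frames 96 ((u.reg .rdi).toNat * (u.reg .rsi).toNat) (r16 ((u.reg .rdi).toNat * (u.reg .rsi).toNat)) u v ∧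
    (H.Fits (r16 ((u.reg .rdi).toNat * (u.reg .rsi).toNat)) →
      ∀ i, i < (u.reg .rdi).toNat * (u.reg .rsi).toNat → v.mem.readLE (UInt64.ofNat (H.next + i)) 1 = 0)
  frame := 96
  writes u :=
    [⟨0x800000, 0x800008⟩,
     ⟨H.next - 32, H.next - 8⟩,
     shadowSpan H.next (H.next + (u.reg .rdi).toNat * (u.reg .rsi).toNat),
     ⟨H.next, H.next + (u.reg .rdi).toNat * (u.reg .rsi).toNat⟩]

@[vspec] theorem calloc.spec_frame (T : Text) (H : Heap) (rest : List Obj) (frames : List (Nat × FrameLayout)) :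
    (calloc.spec T H rest frames).frame = 96 := id rfl

@[vspec] theorem calloc.spec_writes (T : Text) (H : Heap) (rest : List Obj) (frames : List (Nat × FrameLayout)) (u : State) :
    (calloc.spec T H rest frames).writes u =
      [⟨0x800000, 0x800008⟩,
       ⟨H.next - 32, H.next - 8⟩,
       shadowSpan H.next (H.next + (u.reg .rdi).toNat * (u.reg .rsi).toNat),
       ⟨H.next, H.next + (u.reg .rdi).toNat * (u.reg .rsi).toNat⟩] := id rfl

/-- **`free(rdi = p)`**: `p` is NULL, or the start of the LIVE object `(p, n)` of `H` (anything else goes to the report routine: a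
double free, an interior pointer, a pointer that never came from the heap). NULL: nothing happens. Otherwise the heap is
`H.release p`: that object is freed — poisoned, its chunk never to be handed out again —, every other object is as it was: live
(`Heap.Live.release_ne`), at its address, with its bytes (`free_keeps`). Footprint: the state word of the header, the shadow of the
object, 24 bytes of stack. -/
def free.spec (T : Text) (H : Heap) (rest : List Obj) (frames : List (Nat × FrameLayout)) (n : Nat) : Spec where
  pre u := HeapPre T H rest frames u ∧ ((u.reg .rdi).toNat = 0 ∨ H.Live (u.reg .rdi).toNat n)
  post u v :=
    ((u.reg .rdi).toNat = 0 →
      HeapInv H rest frames ((u.reg .rsp).toNat + 8) v.mem ∧ ShadowUntouched u.mem v.mem) ∧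
    ((u.reg .rdi).toNat ≠ 0 →
      HeapInv (H.release (u.reg .rdi).toNat) rest frames ((u.reg .rsp).toNat + 8) v.mem)
  frame := 24
  writes u :=
    [⟨(u.reg .rdi).toNat - 24, (u.reg .rdi).toNat - 16⟩,
     shadowSpan (u.reg .rdi).toNat ((u.reg .rdi).toNat + n)]

@[vspec] theorem free.spec_frame (T : Text) (H : Heap) (rest : List Obj) (frames : List (Nat × FrameLayout)) (n : Nat) :
    (free.spec T H rest frames n).frame = 24 := id rfl

@[vspec] theorem free.spec_writes (T : Text) (H : Heap) (rest : List Obj) (frames : List (Nat × FrameLayout)) (n : Nat)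
    (u : State) :
    (free.spec T H rest frames n).writes u =
      [⟨(u.reg .rdi).toNat - 24, (u.reg .rdi).toNat - 16⟩,
       shadowSpan (u.reg .rdi).toNat ((u.reg .rdi).toNat + n)] := id rfl

/-- **`free(p)` keeps the bytes of every other object** (live or freed: anything with another base), and of everything outside the
heap, the shadow and the callee's stack frame: what its footprint says, spelled out for a client's ownership argument. -/
theorem free_keeps {K : Conv} {T : Text} {H : Heap} {rest : List Obj} {frames : List (Nat × FrameLayout)} {n : Nat}
    {u v : State} {ret : Word} (hr : Returned K (free.spec T H rest frames n) u ret v)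
    (hpre : (free.spec T H rest frames n).pre u) {o : HObj} (ho : o ∈ H.objs) (hne : o.base ≠ (u.reg .rdi).toNat) :
    Mem.EqOn o.base (o.base + o.cap) u.mem v.mem := by
  obtain ⟨hp, hcase⟩ := hpre
  have hrange := hp.inv.heap.obj_range ho
  have hinside := hp.inv.heap.obj_inside ho
  have hsp := hp.inv.shadow.stack.hi
  have hoff := hp.inv.heap.offStack
  have hroom := hp.inv.heap.room
  rw [hp.base] at hrange hoff hroom
  rw [hp.limit] at hoff hroom
  apply hr.eqOn
  intro w hw
  unfold Spec.footprint at hw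
  rw [free.spec_frame, free.spec_writes] at hw
  rcases List.mem_cons.mp hw with rfl | hw
  · simp only
    omega
  · rcases List.mem_cons.mp hw with rfl | hw
    · simp only
      rcases hcase with h0 | hl
      · omega
      · obtain ⟨c, hl⟩ := hl
        have hap := hp.inv.heap.apart_of_base_ne ho hl hne
        simp only at hap
        omega
    · have e : w = shadowSpan (u.reg .rdi).toNat ((u.reg .rdi).toNat + n) := List.mem_singleton.mp hw
      subst e
      unfold shadowSpan
      simp only
      omega

/-- The capacity a moving `realloc` to `m` bytes asks for: twice the rounded size, or the rounded size if twice does not fit. -/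
def _root_.Asan.Heap.moveCap (H : Heap) (m : Nat) : Nat := if H.Fits (2 * r16 m) then 2 * r16 m else r16 m

/-- A moving `realloc` succeeds exactly when the rounded size fits. -/
theorem _root_.Asan.Heap.fits_moveCap (H : Heap) (m : Nat) : H.Fits (H.moveCap m) ↔ H.Fits (r16 m) := by
  unfold Heap.moveCap
  by_cases h2 : H.Fits (2 * r16 m)
  · rw [if_pos h2]
    unfold Heap.Fits at h2 ⊢
    constructor
    · intro _
      omega
    · intro _
      exact h2
  · rw [if_neg h2]

/-! ### THE FOOTPRINT OF `realloc` / `reallocarray`: what an outcome wrote, and the static `writes`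

`realloc(p, m)` has three outcomes, and they write DIFFERENT places: in place, nothing at or above `H.next` is touched, whatever `m` is
(`m` may exceed the room left above `H.next`: the request is served inside the old chunk); moved, a new chunk is written at `H.next`
and `H.Fits (r16 m)` says it lies inside the region; failed, nothing but stack. A client needs both forms:

  * PER OUTCOME, EXACT: the last clause of every arm of `ReallocPost` is a `Mem.SameExcept` with the windows of THAT outcome
    (`ReallocPost.inplace_sameExcept`, `.moved_sameExcept`, `.failed_sameExcept`; all three at once, coarser:
    `ReallocPost.sameExcept_heap`: the stack frame, the heap's region, the heap's shadow).
  * STATIC, for a caller's own `writes` (`Spec.writes` is a function of the entry state and the ghosts: it cannot know the outcome):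
    ONE window list for all outcomes, in which the windows of the NEW chunk (header, body, shadow) are CLIPPED at the end of the
    heap's region (`heapClip x = min x C00000H`), and the shadow window of the OLD object is clipped to the region on both sides
    (`heapFloor x = max x 800000H`: `p = 0` — the `malloc` arm, where the ghost `c` means nothing — gives a window inside the region's
    shadow). So EVERY window is empty or lies inside `[800000H, C00000H)` or inside its shadow `[D00000H, D80000H)` (`HeapWindow`;
    `realloc.spec_writes_inside`, `reallocarray.spec_writes_inside`; for a `Returned` state: `realloc_same_heap`,
    `reallocarray_same_heap`), for EVERY outcome and every `m`.
    WHY CLIPPED, and not conditional on the ghost facts (`if c < r16 m ∧ H.Fits (r16 m) then … else ⟨0, 0⟩`): the frame tactics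
    (`u_eqon`, `u_same`, `u_frame`, `v_untouched`) hand every window, after the `vspec` rewrite, to `u_omega`, which keeps the
    ARITHMETIC hypotheses only: the condition of an `if` on `H.Fits …` is dropped and the side goal fails.
    WHY `heapClip` / `heapFloor` ARE FUNCTIONS WITH NAMES, and not `min` / `max` written out: `omega` splits cases on every `min` and
    `max` it meets, and `u_same` through a callee asks "this window lies in ONE OF the caller's windows" — with five `min` / `max` in a
    list of seven windows that is 90 s for two side goals and a proof term the kernel refuses (deep recursion). A named function is
    an ATOM for `omega`: no case split. Nothing need be known of it whenever the same clipped term stands on both sides (a wrapper that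
    copies the list: `reallocarray`, a client's allocation helper) and whenever only the LOWER end of a window matters (a stack slot, a
    global, an older object lies BELOW `H.next - 32`: no fact about the clipped end is needed).
    Where the upper end matters, say what the clipped term is: `heapClip_of_le` (the moved outcome: `H.Fits (r16 m)` puts the chunk
    inside the region), `heapClip_le_self` (a caller whose own window is the unclipped `⟨H.next, H.next + m⟩`), `heapClip_le`,
    `heapFloor_of_le` (the object at `p ≠ 0` lies in the region), `le_heapFloor`, `self_le_heapFloor` — as hypotheses in the context
    (`u_omega` keeps them: they are arithmetic) or by `rw`. What the clipped list loses against the conditional one — in the static list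
    an in-place or failed call "may write" the free room above `H.next` — is given back exactly by the clauses of `ReallocPost`. -/

/-- **`x`, clipped at the end of the heap's region** (HEAP_LIMIT of heap.c). A function with a name, so that `omega` takes
`heapClip x` as an atom ("THE FOOTPRINT OF `realloc`" above). -/
def heapClip (x : Nat) : Nat := min x 0xC00000

/-- **`x`, raised to the start of the heap's region** (HEAP_BASE of heap.c). -/
def heapFloor (x : Nat) : Nat := max x 0x800000

/-- A clipped end lies in the region. -/
theorem heapClip_le (x : Nat) : heapClip x ≤ 0xC00000 := by
  unfold heapClip
  omega

/-- Clipping does not enlarge. -/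
theorem heapClip_le_self (x : Nat) : heapClip x ≤ x := by
  unfold heapClip
  omega

/-- Inside the region nothing is clipped. -/
theorem heapClip_of_le {x : Nat} (h : x ≤ 0xC00000) : heapClip x = x := by
  unfold heapClip
  omega

/-- A raised start lies in the region. -/
theorem le_heapFloor (x : Nat) : 0x800000 ≤ heapFloor x := by
  unfold heapFloor
  omega

/-- Raising does not lower. -/
theorem self_le_heapFloor (x : Nat) : x ≤ heapFloor x := by
  unfold heapFloor
  omega

/-- Inside the region nothing is raised. -/
theorem heapFloor_of_le {x : Nat} (h : 0x800000 ≤ x) : heapFloor x = x := by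
  unfold heapFloor
  omega

/-- **A window of the heap's footprint**: empty, or inside the heap's region `[800000H, C00000H)`, or inside the shadow of that
region, `[D00000H, D80000H)`. -/
def HeapWindow (w : Span) : Prop :=
  w.hi ≤ w.lo ∨ (0x800000 ≤ w.lo ∧ w.hi ≤ 0xC00000) ∨ (0xD00000 ≤ w.lo ∧ w.hi ≤ 0xD80000)

/-- **A footprint made of a stack frame and heap windows lies inside the stack frame, the heap's region and its shadow**: the form in
which a client carries a memory invariant (about its globals, its input, its output, its own stack) through a call. -/
theorem sameExcept_heapWindows {S : Span} {ws : List Span} {mem mem' : Mem} (h : Mem.SameExcept (S :: ws) mem mem')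
    (hw : ∀ w, w ∈ ws → HeapWindow w) :
    Mem.SameExcept [S, ⟨0x800000, 0xC00000⟩, ⟨0xD00000, 0xD80000⟩] mem mem' := by
  apply h.mono
  intro w hin a h1 h2
  rcases List.mem_cons.mp hin with rfl | hin
  · exact ⟨_, List.mem_cons_self, h1, h2⟩
  · rcases hw w hin with he | ⟨k1, k2⟩ | ⟨k1, k2⟩
    · omega
    · refine ⟨⟨0x800000, 0xC00000⟩, List.mem_cons_of_mem _ List.mem_cons_self, ?_, ?_⟩
      · show 0x800000 ≤ a
        omega
      · show a < 0xC00000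
        omega
    · refine ⟨⟨0xD00000, 0xD80000⟩, List.mem_cons_of_mem _ (List.mem_cons_of_mem _ List.mem_cons_self), ?_, ?_⟩
      · show 0xD00000 ≤ a
        omega
      · show a < 0xD80000
        omega

/-- The postcondition of `realloc(p, m)` for the live object `(p, n)` of capacity `c`, `p ≠ 0`. THREE outcomes, decided by the
ghost state:
  IN PLACE (`r16 m ≤ c`): rax = p; the heap is `H.resize p m`; no byte of `[p, p + c)` was written.
  MOVED (`c < r16 m`, and `r16 m` fits): rax = `H.next`; the heap is `(H.push m c').release p` with `c' = H.moveCap m`; the `n` bytes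
    of the old object (`n < m` here) were copied to the new one; the old one is freed.
  FAILED (`c < r16 m`, and `r16 m` does not fit): `FailPost`: rax = 0, the heap is `H`, the old object is live and untouched.
EVERY ARM ENDS WITH WHAT WAS WRITTEN (`F` is the contract's frame; for FAILED it is `FailPost`'s last clause: the stack frame only):
  IN PLACE: the stack frame; the header of the object (the size word, in `[p - 32, p - 16)`); the shadow of the room of its chunk,
    `[p, p + c)` (`arena_poison(p, n)`, `arena_unpoison(p, m)`). NOTHING at or above `H.next`, whatever `m` is.
  MOVED: the stack frame; the control cell; the new chunk's header `[H.next - 32, H.next - 8)`; the shadow of the new object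
    `[H.next, H.next + m)`; the `n` bytes copied to `[H.next, H.next + n)`; the state word `[p - 24, p - 16)` of the old header; the
    shadow of the old object `[p, p + n)`. No byte of `[p, p + c)` is written. With `H.Fits (r16 m)` every window lies inside the
    heap's region or its shadow (`ReallocPost.sameExcept_heap`).
The clause that says what was written is the LAST of its arm. -/
def ReallocPost (H : Heap) (rest : List Obj) (frames : List (Nat × FrameLayout)) (F p n c m : Nat) (u v : State) : Prop :=
  (r16 m ≤ c →
    (v.reg .rax).toNat = p ∧
    HeapInv (H.resize p m) rest frames ((u.reg .rsp).toNat + 8) v.mem ∧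
    Mem.EqOn p (p + c) u.mem v.mem ∧
    Mem.SameExcept
      [⟨(u.reg .rsp).toNat - F, (u.reg .rsp).toNat⟩,
       ⟨p - 32, p - 16⟩,
       shadowSpan p (p + c)] u.mem v.mem) ∧
  (c < r16 m → H.Fits (r16 m) →
    (v.reg .rax).toNat = H.next ∧
    HeapInv ((H.push m (H.moveCap m)).release p) rest frames ((u.reg .rsp).toNat + 8) v.mem ∧
    (∀ i, i < n → v.mem.readLE (UInt64.ofNat (H.next + i)) 1 = u.mem.readLE (UInt64.ofNat (p + i)) 1) ∧
    Mem.SameExcept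
      [⟨(u.reg .rsp).toNat - F, (u.reg .rsp).toNat⟩,
       ⟨0x800000, 0x800008⟩,
       ⟨H.next - 32, H.next - 8⟩,
       shadowSpan H.next (H.next + m),
       ⟨H.next, H.next + n⟩,
       ⟨p - 24, p - 16⟩,
       shadowSpan p (p + n)] u.mem v.mem) ∧
  (c < r16 m → ¬ H.Fits (r16 m) → FailPost H rest frames F u v)

/-- **The static windows of `realloc(p, m)` / `reallocarray(p, k, s)` (`m = k · s`)** for the live object at `p` of capacity `c`: the
control cell; the NEW chunk's header, shadow and body, each clipped at the end of the heap's region; the OLD chunk's header; the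
shadow of the old chunk's room, clipped to the region. ("THE FOOTPRINT OF `realloc`" above; the two Specs write the list out, so that
the `vspec` rules rewrite to literal windows.) -/
def reallocWrites (H : Heap) (p c m : Nat) : List Span :=
  [⟨0x800000, 0x800008⟩,
   ⟨H.next - 32, heapClip (H.next - 8)⟩,
   shadowSpan H.next (heapClip (H.next + m)),
   ⟨H.next, heapClip (H.next + m)⟩,
   ⟨p - 32, p - 16⟩,
   shadowSpan (heapFloor p) (heapClip (p + c))]

/-- **Every static window of `realloc` is empty or lies inside the heap's region or its shadow**, for every `m` and every outcome:
`p` is NULL or the start of an object of capacity `c` of a heap at `800000H`. -/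
theorem reallocWrites_inside {H : Heap} {mem : Mem} {p n c : Nat} (m : Nat) (hok : HeapOK H mem) (hbase : H.base = 0x800000)
    (hp : p = 0 ∨ H.LiveCap p n c) : ∀ w, w ∈ reallocWrites H p c m → HeapWindow w := by
  have hnext := Heap.next_def H
  rw [hbase] at hnext
  -- where `p` is: NULL, or inside the region with its chunk
  have hpr : p = 0 ∨ (0x800040 ≤ p ∧ p + c + 32 ≤ 0xC00000) := by
    rcases hp with h0 | hl
    · exact Or.inl h0
    · have hr := hok.obj_range hl
      have hi := hok.obj_inside hl
      simp only at hr hi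
      rw [hbase] at hr
      exact Or.inr ⟨by omega, by omega⟩
  intro w hw
  unfold reallocWrites heapClip heapFloor at hw
  unfold HeapWindow
  rcases List.mem_cons.mp hw with rfl | hw
  · simp only
    omega
  rcases List.mem_cons.mp hw with rfl | hw
  · simp only
    omega
  rcases List.mem_cons.mp hw with rfl | hw
  · unfold shadowSpan
    simp only
    omega
  rcases List.mem_cons.mp hw with rfl | hw
  · simp only
    omega
  rcases List.mem_cons.mp hw with rfl | hw
  · simp only
    omega
  · have e : w = shadowSpan (max p 0x800000) (min (p + c) 0xC00000) := List.mem_singleton.mp hw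
    subst e
    unfold shadowSpan
    simp only
    omega

/-- **`realloc(rdi = p, rsi = m)`**: `p` is NULL — then it is `malloc(m)` — or the start of the live object `(p, n)` of capacity
`c`. `m = 0` is not special (C11 leaves it to the implementation): `r16 0 = 0 ≤ c`, so the object shrinks to size 0 in place. So
rax = 0 means failure, and then the old object is untouched, for EVERY `m`. The `writes` are `reallocWrites H p c m`, written out:
the windows of ALL outcomes, clipped to the heap's region ("THE FOOTPRINT OF `realloc`" above; `realloc.spec_writes_inside`); what ONE
outcome wrote is the last clause of its arm of `ReallocPost`. -/
def realloc.spec (T : Text) (H : Heap) (rest : List Obj) (frames : List (Nat × FrameLayout)) (n c : Nat) : Spec where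
  pre u := HeapPre T H rest frames u ∧ ((u.reg .rdi).toNat = 0 ∨ H.LiveCap (u.reg .rdi).toNat n c)
  post u v :=
    ((u.reg .rdi).toNat = 0 → AllocPost H rest frames 128 (u.reg .rsi).toNat (r16 (u.reg .rsi).toNat) u v) ∧
    ((u.reg .rdi).toNat ≠ 0 → ReallocPost H rest frames 128 (u.reg .rdi).toNat n c (u.reg .rsi).toNat u v)
  frame := 128
  writes u :=
    [⟨0x800000, 0x800008⟩,
     ⟨H.next - 32, heapClip (H.next - 8)⟩,
     shadowSpan H.next (heapClip (H.next + (u.reg .rsi).toNat)),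
     ⟨H.next, heapClip (H.next + (u.reg .rsi).toNat)⟩,
     ⟨(u.reg .rdi).toNat - 32, (u.reg .rdi).toNat - 16⟩,
     shadowSpan (heapFloor (u.reg .rdi).toNat) (heapClip ((u.reg .rdi).toNat + c))]

@[vspec] theorem realloc.spec_frame (T : Text) (H : Heap) (rest : List Obj) (frames : List (Nat × FrameLayout)) (n c : Nat) :
    (realloc.spec T H rest frames n c).frame = 128 := id rfl

@[vspec] theorem realloc.spec_writes (T : Text) (H : Heap) (rest : List Obj) (frames : List (Nat × FrameLayout)) (n c : Nat)
    (u : State) :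
    (realloc.spec T H rest frames n c).writes u =
      [⟨0x800000, 0x800008⟩,
       ⟨H.next - 32, heapClip (H.next - 8)⟩,
       shadowSpan H.next (heapClip (H.next + (u.reg .rsi).toNat)),
       ⟨H.next, heapClip (H.next + (u.reg .rsi).toNat)⟩,
       ⟨(u.reg .rdi).toNat - 32, (u.reg .rdi).toNat - 16⟩,
       shadowSpan (heapFloor (u.reg .rdi).toNat) (heapClip ((u.reg .rdi).toNat + c))] := id rfl

/-- **Every static window of `realloc.spec` is a `HeapWindow`**: whatever the outcome, a call writes its stack frame, the heap's
region and the heap's shadow only. -/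
theorem realloc.spec_writes_inside {T : Text} {H : Heap} {rest : List Obj} {frames : List (Nat × FrameLayout)} {n c : Nat}
    {u : State} (hpre : (realloc.spec T H rest frames n c).pre u) :
    ∀ w, w ∈ (realloc.spec T H rest frames n c).writes u → HeapWindow w :=
  reallocWrites_inside (u.reg .rsi).toNat hpre.1.inv.heap hpre.1.base hpre.2

/-- **`reallocarray(rdi = p, rsi = k, rdx = s)`**: `realloc(p, k · s)` with the product of the NUMBERS. If both factors are non-zero
and one exceeds `ROOM`, the product exceeds `ROOM`: it fits neither the heap nor any capacity, and NULL is returned without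
computing it (`FailPost`: the old object untouched); otherwise the machine's 64-bit product is exact. The `writes` are
`reallocWrites H p c (k · s)`, written out (as `realloc.spec`'s: clipped to the heap's region). -/
def reallocarray.spec (T : Text) (H : Heap) (rest : List Obj) (frames : List (Nat × FrameLayout)) (n c : Nat) : Spec where
  pre u := HeapPre T H rest frames u ∧ ((u.reg .rdi).toNat = 0 ∨ H.LiveCap (u.reg .rdi).toNat n c)
  post u v :=
    ((u.reg .rdi).toNat = 0 →
      AllocPost H rest frames 160 ((u.reg .rsi).toNat * (u.reg .rdx).toNat) (r16 ((u.reg .rsi).toNat * (u.reg .rdx).toNat)) u v) ∧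
    ((u.reg .rdi).toNat ≠ 0 →
      ReallocPost H rest frames 160 (u.reg .rdi).toNat n c ((u.reg .rsi).toNat * (u.reg .rdx).toNat) u v)
  frame := 160
  writes u :=
    [⟨0x800000, 0x800008⟩,
     ⟨H.next - 32, heapClip (H.next - 8)⟩,
     shadowSpan H.next (heapClip (H.next + (u.reg .rsi).toNat * (u.reg .rdx).toNat)),
     ⟨H.next, heapClip (H.next + (u.reg .rsi).toNat * (u.reg .rdx).toNat)⟩,
     ⟨(u.reg .rdi).toNat - 32, (u.reg .rdi).toNat - 16⟩,
     shadowSpan (heapFloor (u.reg .rdi).toNat) (heapClip ((u.reg .rdi).toNat + c))]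

@[vspec] theorem reallocarray.spec_frame (T : Text) (H : Heap) (rest : List Obj) (frames : List (Nat × FrameLayout))
    (n c : Nat) : (reallocarray.spec T H rest frames n c).frame = 160 := id rfl

@[vspec] theorem reallocarray.spec_writes (T : Text) (H : Heap) (rest : List Obj) (frames : List (Nat × FrameLayout))
    (n c : Nat) (u : State) :
    (reallocarray.spec T H rest frames n c).writes u =
      [⟨0x800000, 0x800008⟩,
       ⟨H.next - 32, heapClip (H.next - 8)⟩,
       shadowSpan H.next (heapClip (H.next + (u.reg .rsi).toNat * (u.reg .rdx).toNat)),
       ⟨H.next, heapClip (H.next + (u.reg .rsi).toNat * (u.reg .rdx).toNat)⟩,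
       ⟨(u.reg .rdi).toNat - 32, (u.reg .rdi).toNat - 16⟩,
       shadowSpan (heapFloor (u.reg .rdi).toNat) (heapClip ((u.reg .rdi).toNat + c))] := id rfl

/-- **Every static window of `reallocarray.spec` is a `HeapWindow`.** -/
theorem reallocarray.spec_writes_inside {T : Text} {H : Heap} {rest : List Obj} {frames : List (Nat × FrameLayout)} {n c : Nat}
    {u : State} (hpre : (reallocarray.spec T H rest frames n c).pre u) :
    ∀ w, w ∈ (reallocarray.spec T H rest frames n c).writes u → HeapWindow w :=
  reallocWrites_inside ((u.reg .rsi).toNat * (u.reg .rdx).toNat) hpre.1.inv.heap hpre.1.base hpre.2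

/-- **A call of `realloc` writes its stack frame, the heap's region and the heap's shadow, and nothing else** — for every outcome,
from the static footprint alone (what a caller's own `writes` can be made of). -/
theorem realloc_same_heap {K : Conv} {T : Text} {H : Heap} {rest : List Obj} {frames : List (Nat × FrameLayout)} {n c : Nat}
    {u v : State} {ret : Word} (hr : Returned K (realloc.spec T H rest frames n c) u ret v)
    (hpre : (realloc.spec T H rest frames n c).pre u) :
    Mem.SameExcept [⟨(u.reg .rsp).toNat - 128, (u.reg .rsp).toNat⟩, ⟨0x800000, 0xC00000⟩, ⟨0xD00000, 0xD80000⟩] u.mem v.mem :=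
  sameExcept_heapWindows hr.same (realloc.spec_writes_inside hpre)

/-- **A call of `reallocarray` writes its stack frame, the heap's region and the heap's shadow, and nothing else.** -/
theorem reallocarray_same_heap {K : Conv} {T : Text} {H : Heap} {rest : List Obj} {frames : List (Nat × FrameLayout)} {n c : Nat}
    {u v : State} {ret : Word} (hr : Returned K (reallocarray.spec T H rest frames n c) u ret v)
    (hpre : (reallocarray.spec T H rest frames n c).pre u) :
    Mem.SameExcept [⟨(u.reg .rsp).toNat - 160, (u.reg .rsp).toNat⟩, ⟨0x800000, 0xC00000⟩, ⟨0xD00000, 0xD80000⟩] u.mem v.mem :=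
  sameExcept_heapWindows hr.same (reallocarray.spec_writes_inside hpre)

/-- **WHAT A CLIENT OF `realloc` / `reallocarray` CASE-SPLITS ON**: the result is the same address with the new size, or a new
object with the old one freed, or NULL with the old object still live — and nothing else. Each case ends with what was written. -/
theorem ReallocPost.cases {H : Heap} {rest : List Obj} {frames : List (Nat × FrameLayout)} {F p n c m : Nat} {u v : State}
    (h : ReallocPost H rest frames F p n c m u v) :
    ((v.reg .rax).toNat = p ∧ HeapInv (H.resize p m) rest frames ((u.reg .rsp).toNat + 8) v.mem ∧
      Mem.SameExcept
        [⟨(u.reg .rsp).toNat - F, (u.reg .rsp).toNat⟩,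
         ⟨p - 32, p - 16⟩,
         shadowSpan p (p + c)] u.mem v.mem) ∨
    ((v.reg .rax).toNat = H.next ∧ (∃ c', HeapInv ((H.push m c').release p) rest frames ((u.reg .rsp).toNat + 8) v.mem) ∧
      Mem.SameExcept
        [⟨(u.reg .rsp).toNat - F, (u.reg .rsp).toNat⟩,
         ⟨0x800000, 0x800008⟩,
         ⟨H.next - 32, H.next - 8⟩,
         shadowSpan H.next (H.next + m),
         ⟨H.next, H.next + n⟩,
         ⟨p - 24, p - 16⟩,
         shadowSpan p (p + n)] u.mem v.mem) ∨
    (v.reg .rax = 0 ∧ HeapInv H rest frames ((u.reg .rsp).toNat + 8) v.mem ∧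
      Mem.SameExcept [⟨(u.reg .rsp).toNat - F, (u.reg .rsp).toNat⟩] u.mem v.mem) := by
  obtain ⟨h1, h2, h3⟩ := h
  by_cases hc : r16 m ≤ c
  · obtain ⟨k1, k2, _, k4⟩ := h1 hc
    exact Or.inl ⟨k1, k2, k4⟩
  · by_cases hf : H.Fits (r16 m)
    · obtain ⟨k1, k2, _, k4⟩ := h2 (by omega) hf
      exact Or.inr (Or.inl ⟨k1, ⟨_, k2⟩, k4⟩)
    · obtain ⟨k1, k2, _, k4⟩ := h3 (by omega) hf
      exact Or.inr (Or.inr ⟨k1, k2, k4⟩)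

/-- **What an IN-PLACE `realloc` wrote**: its stack frame, the header of the object, the shadow of its chunk's room — nothing at or
above `H.next`, however large `m` is. -/
theorem ReallocPost.inplace_sameExcept {H : Heap} {rest : List Obj} {frames : List (Nat × FrameLayout)} {F p n c m : Nat}
    {u v : State} (h : ReallocPost H rest frames F p n c m u v) (hc : r16 m ≤ c) :
    Mem.SameExcept
      [⟨(u.reg .rsp).toNat - F, (u.reg .rsp).toNat⟩,
       ⟨p - 32, p - 16⟩,
       shadowSpan p (p + c)] u.mem v.mem :=
  (h.1 hc).2.2.2

/-- **What a MOVING `realloc` wrote**: its stack frame, the control cell, the new chunk (header, shadow, the `n` bytes copied), the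
state word of the old header, the shadow of the old object. -/
theorem ReallocPost.moved_sameExcept {H : Heap} {rest : List Obj} {frames : List (Nat × FrameLayout)} {F p n c m : Nat}
    {u v : State} (h : ReallocPost H rest frames F p n c m u v) (hc : c < r16 m) (hfit : H.Fits (r16 m)) :
    Mem.SameExcept
      [⟨(u.reg .rsp).toNat - F, (u.reg .rsp).toNat⟩,
       ⟨0x800000, 0x800008⟩,
       ⟨H.next - 32, H.next - 8⟩,
       shadowSpan H.next (H.next + m),
       ⟨H.next, H.next + n⟩,
       ⟨p - 24, p - 16⟩,
       shadowSpan p (p + n)] u.mem v.mem :=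
  (h.2.1 hc hfit).2.2.2

/-- **What a FAILED `realloc` wrote**: its stack frame. -/
theorem ReallocPost.failed_sameExcept {H : Heap} {rest : List Obj} {frames : List (Nat × FrameLayout)} {F p n c m : Nat}
    {u v : State} (h : ReallocPost H rest frames F p n c m u v) (hc : c < r16 m) (hnf : ¬ H.Fits (r16 m)) :
    Mem.SameExcept [⟨(u.reg .rsp).toNat - F, (u.reg .rsp).toNat⟩] u.mem v.mem :=
  (h.2.2 hc hnf).2.2.2

/-- **WHATEVER THE OUTCOME, `realloc(p, m)` wrote its stack frame, the heap's region and the heap's shadow only** (from the exact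
clauses of the three arms: a moved chunk lies inside the region because `r16 m` fits). -/
theorem ReallocPost.sameExcept_heap {T : Text} {H : Heap} {rest : List Obj} {frames : List (Nat × FrameLayout)} {F p n c m : Nat}
    {u v : State} (h : ReallocPost H rest frames F p n c m u v) (hpre : HeapPre T H rest frames u) (hl : H.LiveCap p n c) :
    Mem.SameExcept [⟨(u.reg .rsp).toNat - F, (u.reg .rsp).toNat⟩, ⟨0x800000, 0xC00000⟩, ⟨0xD00000, 0xD80000⟩] u.mem v.mem := by
  have hok := hpre.inv.heap
  have hr := hok.obj_range hl
  have hi := hok.obj_inside hl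
  have hsc := hok.size_le_cap hl
  have hnext := Heap.next_def H
  simp only at hr hi hsc
  rw [hpre.base] at hr hnext
  by_cases hc : r16 m ≤ c
  · -- in place: the header and the shadow of the chunk's room
    apply sameExcept_heapWindows (h.inplace_sameExcept hc)
    intro w hw
    unfold HeapWindow
    rcases List.mem_cons.mp hw with rfl | hw
    · simp only
      omega
    · have e : w = shadowSpan p (p + c) := List.mem_singleton.mp hw
      subst e
      unfold shadowSpan
      simp only
      omega
  · by_cases hfit : H.Fits (r16 m)
    · -- moved: the new chunk lies inside the region
      obtain ⟨r1, r2, r3, r4, r5⟩ := hok.next_range hfit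
      have hlem := le_r16 m
      apply sameExcept_heapWindows (h.moved_sameExcept (by omega) hfit)
      intro w hw
      unfold HeapWindow
      rcases List.mem_cons.mp hw with rfl | hw
      · simp only
        omega
      rcases List.mem_cons.mp hw with rfl | hw
      · simp only
        omega
      rcases List.mem_cons.mp hw with rfl | hw
      · unfold shadowSpan
        simp only
        omega
      rcases List.mem_cons.mp hw with rfl | hw
      · -- `n < m`: the old object fits its capacity, the new size does not
        have hrn := (hok.capOK _ hl).1
        have hmono : n < m := by
          apply Classical.byContradiction
          intro hge
          have := r16_mono (show m ≤ n by omega)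
          simp only at hrn
          omega
        simp only
        omega
      rcases List.mem_cons.mp hw with rfl | hw
      · simp only
        omega
      · have e : w = shadowSpan p (p + n) := List.mem_singleton.mp hw
        subst e
        unfold shadowSpan
        simp only
        omega
    · -- failed: the stack frame only
      apply sameExcept_heapWindows (h.failed_sameExcept (by omega) hfit)
      intro w hw
      exact absurd hw List.not_mem_nil

/-! ### Passing a post upwards: a wrapper's post from its callee's

A function that calls a heap function and returns its result (`malloc` around `heap_alloc`, `reallocarray` around `realloc`, a
client's own allocation helper) has pushed registers and a return address before the call: the callee's post speaks of the callee's
entry state `s` (its `rsp`, its memory), the wrapper's post of the wrapper's entry state `u`. What relates the two: no shadow byte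
and nothing but the wrapper's own stack frame was written between `u` and `s`; the callee's frame lies inside the wrapper's; the
state `v'` after the wrapper's `ret` has the memory and the rax of the callee's returned state `v`. -/

section Wrap
variable {T : Text} {H : Heap} {rest : List Obj} {frames : List (Nat × FrameLayout)} {F F' : Nat} {u s v v' : State}

/-- **What the callee wrote, seen from the wrapper**: the callee's stack frame lies inside the wrapper's, the other windows `ws` are
the callee's; before the call the wrapper wrote its own stack frame only. -/
theorem sameExcept_wrap {ws : List Span}
    (h : Mem.SameExcept (⟨(s.reg .rsp).toNat - F, (s.reg .rsp).toNat⟩ :: ws) s.mem v.mem)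
    (hstack : Mem.SameExcept [⟨(u.reg .rsp).toNat - F', (u.reg .rsp).toNat⟩] u.mem s.mem)
    (hle : (s.reg .rsp).toNat ≤ (u.reg .rsp).toNat) (hF : (u.reg .rsp).toNat - F' ≤ (s.reg .rsp).toNat - F) :
    Mem.SameExcept (⟨(u.reg .rsp).toNat - F', (u.reg .rsp).toNat⟩ :: ws) u.mem v.mem := by
  refine (hstack.mono ?_).trans (h.mono ?_)
  · intro w hw a h1 h2
    have e : w = ⟨(u.reg .rsp).toNat - F', (u.reg .rsp).toNat⟩ := List.mem_singleton.mp hw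
    subst e
    exact ⟨_, List.mem_cons_self, h1, h2⟩
  · intro w hw a h1 h2
    rcases List.mem_cons.mp hw with rfl | hw
    · refine ⟨_, List.mem_cons_self, ?_, ?_⟩
      · show (u.reg .rsp).toNat - F' ≤ a
        have : (s.reg .rsp).toNat - F ≤ a := h1
        omega
      · show a < (u.reg .rsp).toNat
        have : a < (s.reg .rsp).toNat := h2
        omega
    · exact ⟨w, List.mem_cons_of_mem _ hw, h1, h2⟩

/-- A failed allocation, seen from the wrapper. -/
theorem FailPost.wrap (h : FailPost H rest frames F s v) (hpre : HeapPre T H rest frames u)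
    (hun : ShadowUntouched u.mem s.mem)
    (hstack : Mem.SameExcept [⟨(u.reg .rsp).toNat - F', (u.reg .rsp).toNat⟩] u.mem s.mem)
    (hle : (s.reg .rsp).toNat ≤ (u.reg .rsp).toNat) (hF : (u.reg .rsp).toNat - F' ≤ (s.reg .rsp).toNat - F)
    (hmem : v'.mem = v.mem) (hrax : v'.reg .rax = v.reg .rax) : FailPost H rest frames F' u v' := by
  obtain ⟨k1, k2, k3, k4⟩ := h
  refine ⟨by rw [hrax]; exact k1, ?_, ?_, ?_⟩
  · rw [hmem]
    exact hpre.raise_back k2 (by omega)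
  · rw [hmem]
    exact hun.trans k3
  · rw [hmem]
    refine hstack.trans (k4.mono ?_)
    intro w hw a h1 h2
    have e : w = ⟨(s.reg .rsp).toNat - F, (s.reg .rsp).toNat⟩ := List.mem_singleton.mp hw
    subst e
    refine ⟨_, List.mem_singleton.mpr rfl, ?_, ?_⟩
    · show (u.reg .rsp).toNat - F' ≤ a
      have : (s.reg .rsp).toNat - F ≤ a := h1
      omega
    · show a < (u.reg .rsp).toNat
      have : a < (s.reg .rsp).toNat := h2
      omega

/-- An allocation that frees nothing, seen from the wrapper. -/
theorem AllocPost.wrap {n c : Nat} (h : AllocPost H rest frames F n c s v) (hpre : HeapPre T H rest frames u)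
    (hun : ShadowUntouched u.mem s.mem)
    (hstack : Mem.SameExcept [⟨(u.reg .rsp).toNat - F', (u.reg .rsp).toNat⟩] u.mem s.mem)
    (hle : (s.reg .rsp).toNat ≤ (u.reg .rsp).toNat) (hF : (u.reg .rsp).toNat - F' ≤ (s.reg .rsp).toNat - F)
    (hmem : v'.mem = v.mem) (hrax : v'.reg .rax = v.reg .rax) : AllocPost H rest frames F' n c u v' := by
  refine ⟨fun hfit => ?_, fun hnf => (h.2 hnf).wrap hpre hun hstack hle hF hmem hrax⟩
  obtain ⟨k1, k2⟩ := h.1 hfit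
  refine ⟨by rw [hrax]; exact k1, ?_⟩
  rw [hmem]
  exact hpre.raise_back k2 (by omega)

/-- A `realloc`, seen from the wrapper: every clause of every arm passes through; in the clauses that say what was written the
stack window widens from the callee's frame to the wrapper's (`sameExcept_wrap`). -/
theorem ReallocPost.wrap {p n c m : Nat} (h : ReallocPost H rest frames F p n c m s v) (hpre : HeapPre T H rest frames u)
    (hl : H.LiveCap p n c) (hun : ShadowUntouched u.mem s.mem)
    (hstack : Mem.SameExcept [⟨(u.reg .rsp).toNat - F', (u.reg .rsp).toNat⟩] u.mem s.mem)
    (hle : (s.reg .rsp).toNat ≤ (u.reg .rsp).toNat) (hF : (u.reg .rsp).toNat - F' ≤ (s.reg .rsp).toNat - F)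
    (hmem : v'.mem = v.mem) (hrax : v'.reg .rax = v.reg .rax) : ReallocPost H rest frames F' p n c m u v' := by
  obtain ⟨h1, h2, h3⟩ := h
  have hi := hpre.inv.heap.obj_inside hl
  have hr := hpre.inv.heap.obj_range hl
  have hsc := hpre.inv.heap.size_le_cap hl
  have hsp := hpre.inv.shadow.stack.hi
  have hoff := hpre.inv.heap.offStack
  have hroom := hpre.inv.heap.room
  simp only at hi hr hsc
  rw [hpre.base] at hr hoff hroom
  rw [hpre.limit] at hoff hroom
  -- the object's bytes are off the wrapper's stack frame
  have hobj : Mem.EqOn p (p + c) u.mem s.mem := by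
    apply hstack.eqOn
    intro w hw
    have e : w = ⟨(u.reg .rsp).toNat - F', (u.reg .rsp).toNat⟩ := List.mem_singleton.mp hw
    subst e
    simp only
    omega
  refine ⟨fun hc => ?_, fun hc hfit => ?_, fun hc hnf => (h3 hc hnf).wrap hpre hun hstack hle hF hmem hrax⟩
  · obtain ⟨k1, k2, k3, k4⟩ := h1 hc
    refine ⟨by rw [hrax]; exact k1, ?_, ?_, ?_⟩
    · rw [hmem]
      exact hpre.raise_back k2 (by omega)
    · rw [hmem]
      exact hobj.trans k3
    · rw [hmem]
      exact sameExcept_wrap k4 hstack hle hF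
  · obtain ⟨k1, k2, k3, k4⟩ := h2 hc hfit
    refine ⟨by rw [hrax]; exact k1, ?_, ?_, ?_⟩
    · rw [hmem]
      exact hpre.raise_back k2 (by omega)
    · intro i hi'
      rw [hmem, k3 i hi']
      have e : (UInt64.ofNat (p + i)).toNat = p + i := toNat_ofNat_lt' _ (by omega)
      exact hobj.readLE (UInt64.ofNat (p + i)) 1 (by omega) (by omega) (by omega)
    · rw [hmem]
      exact sameExcept_wrap k4 hstack hle hF

end Wrap

end ProgX.Spec
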